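-- pv_equiv track=rewrite | github.com/DisneyCA/MahjongPOMCP | Mahjong.py | is_winning_hand_with_exposed
-- ===== SOURCE A (Python) =====
-- from collections import Counter
-- from typing import List, Optional, Dict, Tuple
--
-- WINDCLASS = ["EW", "NW", "SW", "WW"]  # Winds (honors)
--
-- DRAGONCLASS = ["RD", "GD", "WD"]  # Dragons (honors)
--
-- def tile_suit(tile: str) -> str:
--     # last character is suit / class marker
--     return tile[-1]
--
-- def tile_rank(tile: str) -> Optional[int]:
--     # honors (winds, dragons) have no numeric rank
--     if tile in WINDCLASS or tile in DRAGONCLASS: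
--         return None
--     return int(tile[0])
--
-- def is_winning_hand_with_exposed(concealed: List[str], exposed: List[List[str]]) -> bool:
--     """
--     Check standard hand: total 4 melds + 1 pair,
--     where melds in `exposed` are already fixed and
--     only `concealed` tiles can be rearranged.
--     """
--     # Count exposed melds that are valid (triplet or chow)
--     exposed_melds = 0
--     for meld in exposed:
--         if len(meld) == 3 or len(meld) == 4:
--             exposed_melds += 1
--         else:
--             return False  # ignore exotic cases for now
--
--     # Total melds must be 4
--     needed_from_concealed = 4 - exposed_melds
--     if needed_from_concealed < 0:
--         return False
--
--     # Concealed tiles must be enough to form needed melds + 1 pair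
--     if len(concealed) != needed_from_concealed * 3 + 2:
--         return False
--
--     counts = Counter(concealed)
--
--     # Try every possible pair in concealed
--     for tile, c in list(counts.items()):
--         if c >= 2:
--             counts[tile] -= 2
--             if _can_form_exact_melds(counts, needed_from_concealed):
--                 counts[tile] += 2
--                 return True
--             counts[tile] += 2
--
--     return False
--
-- def _can_form_exact_melds(counts: Dict[str, int], target_melds: int) -> bool:
--     """
--     Variant of _can_form_melds that requires exactly `target_melds` melds.
--     """
--     # No tiles left: success if we formed exactly target_melds
--     if all(c == 0 for c in counts.values()):
--         return target_melds == 0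
--
--     # If no melds left to place but still tiles, fail
--     if target_melds <= 0:
--         return False
--
--     # Find first tile with count > 0
--     tile = next(t for t, c in counts.items() if c > 0)
--
--     # Try pung (triplet)
--     if counts[tile] >= 3:
--         counts[tile] -= 3
--         if _can_form_exact_melds(counts, target_melds - 1):
--             counts[tile] += 3
--             return True
--         counts[tile] += 3
--
--     # Try chow (sequence) if suited tile
--     r = tile_rank(tile)
--     s = tile_suit(tile)
--     if r is not None and s in ("B", "C", "D"):
--         if r <= 7:
--             t1 = f"{r}{s}"
--             t2 = f"{r+1}{s}"
--             t3 = f"{r+2}{s}"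
--             if counts.get(t1, 0) > 0 and counts.get(t2, 0) > 0 and counts.get(t3, 0) > 0:
--                 counts[t1] -= 1
--                 counts[t2] -= 1
--                 counts[t3] -= 1
--                 if _can_form_exact_melds(counts, target_melds - 1):
--                     counts[t1] += 1
--                     counts[t2] += 1
--                     counts[t3] += 1
--                     return True
--                 counts[t1] += 1
--                 counts[t2] += 1
--                 counts[t3] += 1
--
--     return False
-- ===== SOURCE B (Python) =====
-- WINDCLASS = ["EW", "NW", "SW", "WW"]
-- DRAGONCLASS = ["RD", "GD", "WD"]
--
-- def _chow_triple(keys, t):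
--     # chow move-table entry for one distinct tile: indices of (r, r+1, r+2) of its
--     # suit in the key list, or None if the tile cannot start a chow
--     if t in WINDCLASS or t in DRAGONCLASS or t == "":
--         return None
--     c, s = t[0], t[-1]
--     try:
--         r = int(c)
--     except ValueError:
--         return None
--     if (s in ("B", "C", "D")) and r <= 7:
--         names = [f"{r}{s}", f"{r + 1}{s}", f"{r + 2}{s}"]
--         idxs = [keys.index(u) if u in keys else None for u in names]
--         if None not in idxs:
--             return tuple(idxs)
--     return None
--
-- def is_winning_hand_with_exposed(concealed, exposed):
--     # shape guards
--     if not all(len(m) in (3, 4) for m in exposed):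
--         return False
--     needed = 4 - len(exposed)
--     if needed < 0 or len(concealed) != needed * 3 + 2:
--         return False
--
--     # ordered distinct tiles with their multiplicities
--     keys = list(dict.fromkeys(concealed))
--     cnt = [concealed.count(t) for t in keys]
--
--     # precomputed chow index table, one entry per distinct tile
--     chow = [_chow_triple(keys, t) for t in keys]
--
--     def wins(v0, m0):
--         # iterative DFS over count vectors with an explicit stack
--         stack = [(v0, m0)]
--         while stack:
--             v, m = stack.pop()
--             if all(c == 0 for c in v):
--                 if m == 0:
--                     return True
--                 continue
--             if m <= 0:
--                 continue
--             i = next(j for j, c in enumerate(v) if c > 0)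
--             trip = chow[i]
--             if trip is not None and all(v[x] > 0 for x in trip):
--                 w = list(v)
--                 for x in trip:
--                     w[x] -= 1
--                 stack.append((w, m - 1))
--             if v[i] >= 3:
--                 w = list(v)
--                 w[i] -= 3
--                 stack.append((w, m - 1))
--         return False
--
--     return any(
--         wins([c - 2 if j == i else c for j, c in enumerate(cnt)], needed)
--         for i, c0 in enumerate(cnt) if c0 >= 2
--     )
-- ===== Notes on version B (the rewrite author's own statement) =====
-- stated objective: alternative
-- what changed: B replaces A's Counter-mutating recursive backtracking (restoring counts after each try and rebuilding chow tile-name strings at every node) by an up-front ordered count vector with a precomputed per-tile chow index table and an explicit-stack iterative DFS over immutable count vectors.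
import Mathlib
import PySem

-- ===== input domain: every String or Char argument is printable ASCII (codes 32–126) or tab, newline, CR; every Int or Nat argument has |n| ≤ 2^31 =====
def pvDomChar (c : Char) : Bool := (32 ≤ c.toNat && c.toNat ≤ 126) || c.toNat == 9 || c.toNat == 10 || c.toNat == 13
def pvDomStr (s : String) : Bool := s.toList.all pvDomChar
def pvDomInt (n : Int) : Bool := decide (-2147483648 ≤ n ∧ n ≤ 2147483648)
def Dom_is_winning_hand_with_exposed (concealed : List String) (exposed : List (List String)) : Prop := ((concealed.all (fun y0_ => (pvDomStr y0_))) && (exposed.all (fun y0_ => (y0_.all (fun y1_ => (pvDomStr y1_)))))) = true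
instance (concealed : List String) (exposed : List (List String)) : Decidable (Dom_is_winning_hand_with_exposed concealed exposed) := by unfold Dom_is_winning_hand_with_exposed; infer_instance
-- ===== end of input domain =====

-- B replaces A's Counter-mutating backtracking by an ordered count vector, a precomputed
-- per-tile chow index table, and an explicit-stack DFS (alternative decomposition, no speed claim).

-- ===== PORT A =====
def pvWind : List String := ["EW", "NW", "SW", "WW"]
def pvDragon : List String := ["RD", "GD", "WD"]

-- tile_rank: none covers both Python's None (honors) and the inputs where Python raises
-- (empty tile: IndexError; non-digit first char: ValueError) — those raises are outside Pre_.
def tileRank? (t : String) : Option Int :=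
  if t ∈ pvWind || t ∈ pvDragon then none
  else
    match PySem.List.pyGet? t.toList 0 with
    | none => none
    | some c => PySem.Int.ofStr? (String.ofList [c])

-- the exposed-meld loop: none = the early 'return False' on a meld of another size
def countExposedMelds : List (List String) → Option Int
  | [] => some 0
  | m :: rest =>
    if m.length = 3 ∨ m.length = 4 then (countExposedMelds rest).map (· + 1) else none

def canFormExactMelds (counts : PySem.Dict String Int) (target : Int) : Bool :=
  if counts.values.all (fun c => c == 0) then target == 0
  else if h : target ≤ 0 then false
  else
    match counts.items.find? (fun p => decide (p.2 > 0)) with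
    | none => false  -- unreachable (Python's next would raise StopIteration)
    | some (tile, _) =>
      if decide (counts.getD tile 0 ≥ 3) &&
          canFormExactMelds (counts.modify tile 0 (· - 3)) (target - 1) then true
      else
        match tileRank? tile with
        | none => false
        | some r =>
          match PySem.List.pyGet? tile.toList (-1) with  -- tile[-1] (tile is nonempty here)
          | none => false
          | some s =>
            if (s == 'B' || s == 'C' || s == 'D') then
              if decide (r ≤ 7) then
                let t1 := PySem.Int.toStr r ++ String.ofList [s]
                let t2 := PySem.Int.toStr (r + 1) ++ String.ofList [s]
                let t3 := PySem.Int.toStr (r + 2) ++ String.ofList [s]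
                if decide (counts.getD t1 0 > 0) && decide (counts.getD t2 0 > 0) &&
                    decide (counts.getD t3 0 > 0) then
                  canFormExactMelds
                    (((counts.modify t1 0 (· - 1)).modify t2 0 (· - 1)).modify t3 0 (· - 1))
                    (target - 1)
                else false
              else false
            else false
termination_by target.toNat
decreasing_by all_goals omega

def is_winning_hand_with_exposed (concealed : List String) (exposed : List (List String)) : Bool :=
  match countExposedMelds exposed with
  | none => false
  | some melds =>
    let needed : Int := 4 - melds
    if needed < 0 then false
    else if (concealed.length : Int) ≠ needed * 3 + 2 then false
    else
      let counts := PySem.Dict.counter concealed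
      counts.items.any (fun p =>
        decide (p.2 ≥ 2) && canFormExactMelds (counts.modify p.1 0 (· - 2)) needed)

-- ===== PORT B =====
-- the chow move table entry for one distinct tile: indices into the key list, or none
def altChowTriple (keys : List String) (t : String) : Option (Nat × Nat × Nat) :=
  if t ∈ pvWind || t ∈ pvDragon || t == "" then none
  else
    match PySem.List.pyGet? t.toList 0, PySem.List.pyGet? t.toList (-1) with
    | some c, some s =>
      (match PySem.Int.ofStr? (String.ofList [c]) with
       | none => none
       | some r =>
         if (s == 'B' || s == 'C' || s == 'D') && decide (r ≤ 7) then
           match PySem.List.index? keys (PySem.Int.toStr r ++ String.ofList [s]),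
                 PySem.List.index? keys (PySem.Int.toStr (r + 1) ++ String.ofList [s]),
                 PySem.List.index? keys (PySem.Int.toStr (r + 2) ++ String.ofList [s]) with
           | some a, some b, some c' => some (a, b, c')
           | _, _, _ => none
         else none)
    | _, _ => none

-- the states pushed for one popped state (stack head = Python's list end; pung ends on top)
def altChildren (chow : List (Option (Nat × Nat × Nat))) (v : List Int) (m : Int) (i : Nat) :
    List (List Int × Int) :=
  (if decide (v.getD i 0 ≥ 3) then [(v.set i (v.getD i 0 - 3), m - 1)] else []) ++
  (match chow[i]? with
   | some (some (a, b, c)) =>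
     if decide (v.getD a 0 > 0) && decide (v.getD b 0 > 0) && decide (v.getD c 0 > 0) then
       let w1 := v.set a (v.getD a 0 - 1)
       let w2 := w1.set b (w1.getD b 0 - 1)
       let w3 := w2.set c (w2.getD c 0 - 1)
       [(w3, m - 1)]
     else []
   | _ => [])

def pvStackMeasure (st : List (List Int × Int)) : Nat :=
  (st.map (fun s => 3 ^ s.2.toNat)).sum

theorem pvStackMeasure_append (a b : List (List Int × Int)) :
    pvStackMeasure (a ++ b) = pvStackMeasure a + pvStackMeasure b := by
  simp [pvStackMeasure]

theorem pvStackMeasure_cons_lt (s : List Int × Int) (rest : List (List Int × Int)) :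
    pvStackMeasure rest < pvStackMeasure ((s) :: rest) := by
  have : 0 < 3 ^ s.2.toNat := Nat.pow_pos (by norm_num)
  simp only [pvStackMeasure, List.map_cons, List.sum_cons]
  omega

theorem altChildren_measure (chow : List (Option (Nat × Nat × Nat))) (v : List Int) (m : Int)
    (i : Nat) (rest : List (List Int × Int)) (hm : ¬ m ≤ 0) :
    pvStackMeasure (altChildren chow v m i ++ rest) < pvStackMeasure ((v, m) :: rest) := by
  have h2 : 2 * 3 ^ (m - 1).toNat < 3 ^ m.toNat := by
    have hmn : m.toNat = (m - 1).toNat + 1 := by omega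
    have hpos : 0 < 3 ^ (m - 1).toNat := Nat.pow_pos (by norm_num)
    rw [hmn, pow_succ]
    omega
  have ha : pvStackMeasure
      (if decide (v.getD i 0 ≥ 3) then [(v.set i (v.getD i 0 - 3), m - 1)] else []) ≤
      3 ^ (m - 1).toNat := by
    split <;> simp [pvStackMeasure]
  have hb : pvStackMeasure
      ((match chow[i]? with
        | some (some (a, b, c)) =>
          if decide (v.getD a 0 > 0) && decide (v.getD b 0 > 0) && decide (v.getD c 0 > 0) then
            let w1 := v.set a (v.getD a 0 - 1)
            let w2 := w1.set b (w1.getD b 0 - 1)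
            let w3 := w2.set c (w2.getD c 0 - 1)
            [(w3, m - 1)]
          else []
        | _ => []) : List (List Int × Int)) ≤ 3 ^ (m - 1).toNat := by
    rcases h : chow[i]? with _ | o
    · simp [pvStackMeasure]
    · rcases o with _ | ⟨⟨a, b, c⟩⟩
      · simp [pvStackMeasure]
      · simp only []
        split <;> simp [pvStackMeasure]
  unfold altChildren
  rw [pvStackMeasure_append, pvStackMeasure_append]
  simp only [pvStackMeasure, List.map_cons, List.sum_cons] at *
  omega

def solveStack (chow : List (Option (Nat × Nat × Nat))) :
    List (List Int × Int) → Bool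
  | [] => false
  | (v, m) :: rest =>
    if v.all (fun c => c == 0) then
      if m == 0 then true else solveStack chow rest
    else if hm : m ≤ 0 then solveStack chow rest
    else
      match v.findIdx? (fun c => decide (c > 0)) with
      | none => solveStack chow rest  -- unreachable (Python's next would raise)
      | some i => solveStack chow (altChildren chow v m i ++ rest)
termination_by st => pvStackMeasure st
decreasing_by
  · exact pvStackMeasure_cons_lt _ _
  · exact pvStackMeasure_cons_lt _ _
  · exact pvStackMeasure_cons_lt _ _
  · exact altChildren_measure _ _ _ _ _ hm

def is_winning_hand_with_exposed_alt (concealed : List String) (exposed : List (List String)) : Bool :=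
  if !(exposed.all fun m => m.length == 3 || m.length == 4) then false
  else
    let needed : Int := 4 - (exposed.length : Int)
    if needed < 0 || (concealed.length : Int) ≠ needed * 3 + 2 then false
    else
      let keys := PySem.Set.ofList concealed          -- list(dict.fromkeys(concealed))
      let cnt : List Int := keys.map fun t => (concealed.count t : Int)
      let chow := keys.map (altChowTriple keys)
      (PySem.List.enumerate cnt).any fun p =>
        decide (p.2 ≥ 2) &&
          solveStack chow
            [((PySem.List.enumerate cnt).map (fun q => if q.1 == p.1 then q.2 - 2 else q.2),
              needed)]

-- ===== PRECONDITION & SPEC =====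
def pvGuardOK (concealed : List String) (exposed : List (List String)) : Prop :=
  (∀ m ∈ exposed, m.length = 3 ∨ m.length = 4) ∧
  (concealed.length : Int) = (4 - (exposed.length : Int)) * 3 + 2

def pvRankSafe (t : String) : Bool :=
  t ∈ pvWind || t ∈ pvDragon ||
  (match t.toList.head? with
   | some c => PySem.Chars.isdigit c
   | none => false)

-- When the shape guards pass, a malformed tile (not an honor and without a leading digit) can
-- make A raise ValueError/IndexError or not depending only on A's accidental search order, so
-- Pre_ excludes such tiles whenever the guards pass (on some of those inputs A still returns).
def Pre_is_winning_hand_with_exposed (concealed : List String) (exposed : List (List String)) : Prop :=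
  pvGuardOK concealed exposed → ∀ t ∈ concealed, pvRankSafe t = true

instance (concealed : List String) (exposed : List (List String)) :
    Decidable (Pre_is_winning_hand_with_exposed concealed exposed) := by
  unfold Pre_is_winning_hand_with_exposed pvGuardOK; infer_instance

def pvWitness_is_winning_hand_with_exposed : List String × List (List String) :=
  (["1B", "2B", "3B", "EW", "EW"],
   [["1C", "1C", "1C"], ["2C", "2C", "2C"], ["3C", "3C", "3C"]])

def Spec_is_winning_hand_with_exposed (concealed : List String) (exposed : List (List String)) (out : Bool) : Prop := out = is_winning_hand_with_exposed_alt concealed exposed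
instance (concealed : List String) (exposed : List (List String)) (out : Bool) : Decidable (Spec_is_winning_hand_with_exposed concealed exposed out) := by unfold Spec_is_winning_hand_with_exposed; infer_instance

-- ===== CLAIM (what is proved, stated in full; the proofs are below) =====
def Claim_equal_is_winning_hand_with_exposed : Prop := ∀ (concealed : List String) (exposed : List (List String)), Dom_is_winning_hand_with_exposed concealed exposed → Pre_is_winning_hand_with_exposed concealed exposed → Spec_is_winning_hand_with_exposed concealed exposed (is_winning_hand_with_exposed concealed exposed)

-- ===== LEMMAS AND PROOFS =====


-- ghost single-state form of B's stack search (proof-only)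
theorem altChildren_snd (chow : List (Option (Nat × Nat × Nat))) (v : List Int) (m : Int)
    (i : Nat) : ∀ p ∈ altChildren chow v m i, p.2 = m - 1 := by
  intro p hp
  unfold altChildren at hp
  rcases List.mem_append.1 hp with h | h
  · split at h <;> simp_all
  · rcases hh : chow[i]? with _ | o
    · rw [hh] at h; simp at h
    · rw [hh] at h
      rcases o with _ | ⟨⟨a, b, c⟩⟩
      · simp at h
      · simp only [] at h
        split at h <;> simp_all

def dfs1 (chow : List (Option (Nat × Nat × Nat))) (v : List Int) (m : Int) : Bool :=
  if v.all (fun c => c == 0) then m == 0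
  else if hm : m ≤ 0 then false
  else
    match v.findIdx? (fun c => decide (c > 0)) with
    | none => false
    | some i => (altChildren chow v m i).attach.any (fun s => dfs1 chow s.1.1 s.1.2)
termination_by m.toNat
decreasing_by
  have := altChildren_snd chow v m i s.1 s.2
  omega

theorem any_attach {α : Type} (l : List α) (f : α → Bool) :
    l.attach.any (fun s => f s.1) = l.any f := by
  rw [Bool.eq_iff_iff]
  simp [List.any_eq_true]

theorem dfs1_eq (chow : List (Option (Nat × Nat × Nat))) (v : List Int) (m : Int) :
    dfs1 chow v m =
      (if v.all (fun c => c == 0) then (m == 0 : Bool)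
       else if m ≤ 0 then false
       else
         match v.findIdx? (fun c => decide (c > 0)) with
         | none => false
         | some i => (altChildren chow v m i).any (fun s => dfs1 chow s.1 s.2)) := by
  rw [dfs1]
  by_cases h1 : v.all (fun c => c == 0)
  · simp only [h1, if_true]
  · simp only [h1, Bool.false_eq_true, if_false]
    by_cases h2 : m ≤ 0
    · simp only [h2, dite_true, if_true]
    · simp only [h2, dite_false, if_false]
      rcases hfi : v.findIdx? (fun c => decide (c > 0)) with _ | i
      · rfl
      · dsimp only
        exact any_attach (altChildren chow v m i) (fun x => dfs1 chow x.1 x.2)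

theorem solveStack_eq_any_aux (chow : List (Option (Nat × Nat × Nat))) :
    ∀ (n : Nat) (st : List (List Int × Int)), pvStackMeasure st ≤ n →
      solveStack chow st = st.any (fun s => dfs1 chow s.1 s.2) := by
  intro n
  induction n with
  | zero =>
    intro st h
    cases st with
    | nil => simp [solveStack]
    | cons s rest =>
      exfalso
      have := pvStackMeasure_cons_lt s rest
      omega
  | succ n ih =>
    intro st h
    cases st with
    | nil => simp [solveStack]
    | cons s rest =>
      obtain ⟨v, m⟩ := s
      have hrest : pvStackMeasure rest ≤ n := by
        have := pvStackMeasure_cons_lt (v, m) rest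
        omega
      rw [solveStack, List.any_cons]
      rw [dfs1_eq]
      by_cases h1 : v.all (fun c => c == 0)
      · simp only [h1, if_true]
        by_cases h0 : (m == 0 : Bool)
        · simp [h0]
        · simp only [h0, Bool.false_eq_true, if_false, Bool.false_or]
          exact ih rest hrest
      · simp only [h1, Bool.false_eq_true, if_false]
        by_cases h2 : m ≤ 0
        · simp only [h2, dite_true, if_true, Bool.false_or]
          exact ih rest hrest
        · simp only [h2, dite_false, if_false]
          rcases hfi : v.findIdx? (fun c => decide (c > 0)) with _ | i
          · simp only [hfi, Bool.false_or]
            exact ih rest hrest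
          · simp only [hfi]
            rw [ih (altChildren chow v m i ++ rest)
                (by have := altChildren_measure chow v m i rest h2; omega)]
            rw [List.any_append]

theorem solveStack_eq_any (chow : List (Option (Nat × Nat × Nat)))
    (st : List (List Int × Int)) :
    solveStack chow st = st.any (fun s => dfs1 chow s.1 s.2) :=
  solveStack_eq_any_aux chow (pvStackMeasure st) st le_rfl

-- find?/findIdx? correspondence on zipped association lists
theorem findIdx?_pos_spec (v : List Int) (i : Nat)
    (h : v.findIdx? (fun c => decide (c > 0)) = some i) :
    i < v.length ∧ v.getD i 0 > 0 := by
  induction v generalizing i with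
  | nil => simp [List.findIdx?_nil] at h
  | cons x xs ih =>
    rw [List.findIdx?_cons] at h
    by_cases hx : x > 0
    · simp [hx] at h; subst h; simpa using hx
    · simp [hx] at h
      rcases h with ⟨k, hk, rfl⟩
      have := ih k hk
      simp only [List.length_cons, List.getD_cons_succ]
      omega

theorem find?_zip_eq (ks : List String) (v : List Int) (h : ks.length = v.length) :
    (ks.zip v).find? (fun p => decide (p.2 > 0)) =
      match v.findIdx? (fun c => decide (c > 0)) with
      | none => none
      | some i => some (ks.getD i "", v.getD i 0) := by
  induction ks generalizing v with
  | nil =>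
    have : v = [] := by cases v <;> simp_all
    subst this; simp
  | cons k ks ih =>
    cases v with
    | nil => simp at h
    | cons c v =>
      rw [List.zip_cons_cons, List.find?_cons, List.findIdx?_cons]
      by_cases hc : c > 0
      · simp [hc]
      · simp only [hc, decide_false, if_false, decide_eq_true_eq]
        rw [ih v (by simpa using h)]
        rcases hfi : v.findIdx? (fun c => decide (c > 0)) with _ | i <;> simp

-- dict-with-fixed-keys ↔ count-vector correspondence
theorem keys_of_items_zip (d : PySem.Dict String Int) (ks : List String) (v : List Int)
    (hlen : v.length = ks.length) (hit : d.items = ks.zip v) : d.keys = ks := by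
  simp only [PySem.Dict.keys, hit]
  exact List.map_fst_zip (le_of_eq hlen.symm)

theorem getD_of_items_zip (d : PySem.Dict String Int) (ks : List String) (v : List Int)
    (hnd : ks.Nodup) (hlen : v.length = ks.length) (hit : d.items = ks.zip v)
    (j : Nat) (hj : j < ks.length) : d.getD (ks.getD j "") 0 = v.getD j 0 := by
  have hjv : j < v.length := by omega
  have hjz : j < (ks.zip v).length := by rw [List.length_zip]; omega
  have hmem : (ks.getD j "", v.getD j 0) ∈ ks.zip v := by
    rw [List.getD_eq_getElem ks "" hj, List.getD_eq_getElem v 0 hjv]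
    have h1 : (ks.zip v)[j]'hjz = (ks[j]'hj, v[j]'hjv) := List.getElem_zip ..
    rw [← h1]
    exact List.getElem_mem hjz
  have hknd : d.keys.Nodup := by rw [keys_of_items_zip d ks v hlen hit]; exact hnd
  exact PySem.Dict.getD_of_mem_items d (by rw [hit]; exact hmem) hknd 0

theorem getD_of_not_mem_zip (d : PySem.Dict String Int) (ks : List String) (v : List Int)
    (hlen : v.length = ks.length) (hit : d.items = ks.zip v)
    (k : String) (hk : k ∉ ks) : d.getD k 0 = 0 := by
  apply PySem.Dict.getD_of_not_contains
  rw [← Bool.not_eq_true, PySem.Dict.contains_iff_mem_keys,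
    keys_of_items_zip d ks v hlen hit]
  exact hk

theorem items_modify_zip (d : PySem.Dict String Int) (ks : List String) (v : List Int)
    (hnd : ks.Nodup) (hlen : v.length = ks.length) (hit : d.items = ks.zip v)
    (j : Nat) (hj : j < ks.length) (f : Int → Int) :
    (d.modify (ks.getD j "") 0 f).items = ks.zip (v.set j (f (v.getD j 0))) := by
  have hk := keys_of_items_zip d ks v hlen hit
  have hmemk : ks.getD j "" ∈ d.keys := by
    rw [hk, List.getD_eq_getElem ks "" hj]
    exact List.getElem_mem hj
  have hcont : d.contains (ks.getD j "") = true :=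
    (PySem.Dict.contains_iff_mem_keys d _).2 hmemk
  have hkeys2 : (d.modify (ks.getD j "") 0 f).keys = ks := by
    rw [PySem.Dict.keys_modify, PySem.Dict.keys_insert_of_contains, hk]
    exact hcont
  have hnd2 : (d.modify (ks.getD j "") 0 f).keys.Nodup := by rw [hkeys2]; exact hnd
  rw [PySem.Dict.items_eq_map_keys _ hnd2 0, hkeys2]
  apply List.ext_getElem
  · rw [List.length_map, List.length_zip, List.length_set]
    omega
  · intro t h1 h2
    have hts : t < ks.length := by simpa using h1
    have htv : t < v.length := by omega
    rw [List.getElem_map, List.getElem_zip, PySem.Dict.getD_modify]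
    by_cases htj : t = j
    · subst htj
      rw [if_pos ((List.getD_eq_getElem ks "" hj).symm)]
      have := getD_of_items_zip d ks v hnd hlen hit t hts
      rw [this, List.getElem_set_self]
    · have hne : ks[t]'hts ≠ ks.getD j "" := by
        intro e
        rw [List.getD_eq_getElem ks "" hj] at e
        have hinj := List.nodup_iff_injective_getElem.1 hnd
        have := hinj (a₁ := ⟨t, hts⟩) (a₂ := ⟨j, hj⟩) (by simpa using e)
        exact htj (by simpa using this)
      rw [if_neg hne]
      have hgt := getD_of_items_zip d ks v hnd hlen hit t hts
      rw [List.getD_eq_getElem ks "" hts] at hgt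
      rw [hgt, List.getElem_set_ne (by omega)]
      rw [List.getD_eq_getElem v 0 htv]

-- the chow table entry read back as A's inline conditions
theorem altChowTriple_some_spec (ks : List String) (t : String) (a b c : Nat)
    (h : altChowTriple ks t = some (a, b, c)) :
    ∃ r s, tileRank? t = some r ∧ PySem.List.pyGet? t.toList (-1) = some s ∧
      ((s == 'B' || s == 'C' || s == 'D') = true) ∧ r ≤ 7 ∧
      PySem.List.index? ks (PySem.Int.toStr r ++ String.ofList [s]) = some a ∧
      PySem.List.index? ks (PySem.Int.toStr (r + 1) ++ String.ofList [s]) = some b ∧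
      PySem.List.index? ks (PySem.Int.toStr (r + 2) ++ String.ofList [s]) = some c := by
  unfold altChowTriple at h
  by_cases hg : (t ∈ pvWind || t ∈ pvDragon || t == "") = true
  · rw [if_pos hg] at h; cases h
  · rw [if_neg hg] at h
    simp only [Bool.or_eq_true, not_or] at hg
    obtain ⟨⟨hw, hd⟩, he⟩ := hg
    rcases h0 : PySem.List.pyGet? t.toList 0 with _ | c0
    · simp [h0] at h
    rcases h1 : PySem.List.pyGet? t.toList (-1) with _ | s0
    · simp [h0, h1] at h
    simp only [h0, h1] at h
    rcases h2 : PySem.Int.ofStr? (String.ofList [c0]) with _ | r0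
    · simp [h2] at h
    simp only [h2] at h
    by_cases h3 : ((s0 == 'B' || s0 == 'C' || s0 == 'D') && decide (r0 ≤ 7)) = true
    · rw [if_pos h3] at h
      rcases h4 : PySem.List.index? ks (PySem.Int.toStr r0 ++ String.ofList [s0]) with _ | a0
      · rw [h4] at h; simp at h
      rcases h5 : PySem.List.index? ks (PySem.Int.toStr (r0 + 1) ++ String.ofList [s0]) with _ | b0
      · rw [h4, h5] at h; simp at h
      rcases h6 : PySem.List.index? ks (PySem.Int.toStr (r0 + 2) ++ String.ofList [s0]) with _ | c1
      · rw [h4, h5, h6] at h; simp at h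
      rw [h4, h5, h6] at h
      simp only [Option.some.injEq] at h
      obtain ⟨rfl, rfl, rfl⟩ := h
      simp only [Bool.and_eq_true, decide_eq_true_eq] at h3
      refine ⟨r0, s0, ?_, rfl, h3.1, h3.2, h4, h5, h6⟩
      unfold tileRank?
      rw [if_neg (by simp [hw, hd]), h0]
      exact h2
    · rw [if_neg h3] at h; cases h

theorem altChowTriple_none_spec (ks : List String) (t : String)
    (h : altChowTriple ks t = none) :
    tileRank? t = none ∨
    ∃ r s, tileRank? t = some r ∧ PySem.List.pyGet? t.toList (-1) = some s ∧
      (((s == 'B' || s == 'C' || s == 'D') = false) ∨ ¬ r ≤ 7 ∨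
       (PySem.Int.toStr r ++ String.ofList [s]) ∉ ks ∨
       (PySem.Int.toStr (r + 1) ++ String.ofList [s]) ∉ ks ∨
       (PySem.Int.toStr (r + 2) ++ String.ofList [s]) ∉ ks) := by
  unfold altChowTriple at h
  by_cases hg : (t ∈ pvWind || t ∈ pvDragon || t == "") = true
  · left
    unfold tileRank?
    by_cases hwd : (decide (t ∈ pvWind) || decide (t ∈ pvDragon)) = true
    · rw [if_pos (by simpa using hwd)]
    · have he : t = "" := by
        simp only [Bool.or_eq_true, not_or] at hg hwd
        rcases hg with (hg | hg) | hg
        · exact absurd hg hwd.1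
        · exact absurd hg hwd.2
        · simpa using hg
      subst he
      decide
  · rw [if_neg hg] at h
    simp only [Bool.or_eq_true, not_or] at hg
    obtain ⟨⟨hw, hd⟩, he⟩ := hg
    rcases h0 : PySem.List.pyGet? t.toList 0 with _ | c0
    · left
      unfold tileRank?
      rw [if_neg (by simp [hw, hd]), h0]
    rcases h1 : PySem.List.pyGet? t.toList (-1) with _ | s0
    · exfalso
      rw [PySem.List.pyGet?_neg_one] at h1
      rw [PySem.List.pyGet?_zero] at h0
      cases ht : t.toList with
      | nil => rw [ht] at h0; simp at h0
      | cons x xs => rw [ht] at h1; simp [List.getLast?_eq_getLast] at h1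
    simp only [h0, h1] at h
    rcases h2 : PySem.Int.ofStr? (String.ofList [c0]) with _ | r0
    · left
      unfold tileRank?
      rw [if_neg (by simp [hw, hd]), h0]
      exact h2
    simp only [h2] at h
    have htr : tileRank? t = some r0 := by
      unfold tileRank?
      rw [if_neg (by simp [hw, hd]), h0]
      exact h2
    by_cases h3 : ((s0 == 'B' || s0 == 'C' || s0 == 'D') && decide (r0 ≤ 7)) = true
    · rw [if_pos h3] at h
      right
      refine ⟨r0, s0, htr, rfl, ?_⟩
      rcases h4 : PySem.List.index? ks (PySem.Int.toStr r0 ++ String.ofList [s0]) with _ | a0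
      · right; right; left
        exact (PySem.List.index?_eq_none_iff _ _).1 h4
      rcases h5 : PySem.List.index? ks (PySem.Int.toStr (r0 + 1) ++ String.ofList [s0]) with _ | b0
      · right; right; right; left
        exact (PySem.List.index?_eq_none_iff _ _).1 h5
      rcases h6 : PySem.List.index? ks (PySem.Int.toStr (r0 + 2) ++ String.ofList [s0]) with _ | c1
      · right; right; right; right
        exact (PySem.List.index?_eq_none_iff _ _).1 h6
      rw [h4, h5, h6] at h
      simp at h
    · right
      refine ⟨r0, s0, htr, rfl, ?_⟩
      simp only [Bool.and_eq_true, decide_eq_true_eq, not_and] at h3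
      by_cases hbc : (s0 == 'B' || s0 == 'C' || s0 == 'D') = true
      · right; left
        exact h3 hbc
      · left
        simpa using hbc

-- the simulation: A's Counter search = the ghost vector search over the same key order
theorem sim (ks : List String) (hnd : ks.Nodup) :
    ∀ (n : Nat) (m : Int), m.toNat = n → ∀ (d : PySem.Dict String Int) (v : List Int),
      v.length = ks.length → d.items = ks.zip v →
      canFormExactMelds d m = dfs1 (ks.map (altChowTriple ks)) v m := by
  intro n
  induction n using Nat.strong_induction_on with
  | _ n ih =>
    intro m hm d v hlen hit
    have hvals : d.values = v := by
      simp only [PySem.Dict.values, hit]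
      exact List.map_snd_zip (le_of_eq hlen)
    rw [canFormExactMelds, dfs1_eq, hvals]
    by_cases h1 : v.all (fun c => c == 0)
    · simp only [h1, if_true]
    · simp only [h1, Bool.false_eq_true, if_false]
      by_cases h2 : m ≤ 0
      · simp only [h2, dite_true, if_true]
      · simp only [h2, dite_false, if_false]
        rw [hit, find?_zip_eq ks v hlen.symm]
        rcases hfi : v.findIdx? (fun c => decide (c > 0)) with _ | i
        · rfl
        · dsimp only
          obtain ⟨hiv, hipos⟩ := findIdx?_pos_spec v i hfi
          have hik : i < ks.length := by omega
          have hgetDi : ks.getD i "" = ks[i]'hik := List.getD_eq_getElem ks "" hik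
          have htile : d.getD (ks.getD i "") 0 = v.getD i 0 :=
            getD_of_items_zip d ks v hnd hlen hit i hik
          unfold altChildren
          rw [List.any_append]
          have hchowi : (ks.map (altChowTriple ks))[i]? = some (altChowTriple ks (ks[i]'hik)) := by
            rw [List.getElem?_map, List.getElem?_eq_getElem hik]
            rfl
          rw [hchowi, hgetDi]
          -- the pung half
          have hpungrec : canFormExactMelds (d.modify (ks[i]'hik) 0 (· - 3)) (m - 1) =
              dfs1 (ks.map (altChowTriple ks)) (v.set i (v.getD i 0 - 3)) (m - 1) := by
            have hmod := items_modify_zip d ks v hnd hlen hit i hik (· - 3)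
            rw [hgetDi] at hmod
            exact ih (m - 1).toNat (by omega) (m - 1) rfl _ _
              (by rw [List.length_set]; exact hlen) hmod
          rw [hgetDi] at htile
          have epung : ((if decide (v.getD i 0 ≥ 3) then [(v.set i (v.getD i 0 - 3), m - 1)]
                else ([] : List (List Int × Int))).any
                (fun s => dfs1 (ks.map (altChowTriple ks)) s.1 s.2)) =
              (decide (d.getD (ks[i]'hik) 0 ≥ 3) &&
                canFormExactMelds (d.modify (ks[i]'hik) 0 (· - 3)) (m - 1)) := by
            rw [htile, hpungrec]
            cases hdc : decide (v.getD i 0 ≥ 3) <;> simp [hdc]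
          rw [epung]
          rcases hct : altChowTriple ks (ks[i]'hik) with _ | ⟨⟨a, b, c⟩⟩
          · rcases altChowTriple_none_spec ks (ks[i]'hik) hct with htr |
              ⟨r, s, htr, hlast, hcase⟩
            · rw [htr]
              cases hb : (decide (d.getD (ks[i]'hik) 0 ≥ 3) &&
                  canFormExactMelds (d.modify (ks[i]'hik) 0 (· - 3)) (m - 1)) <;> simp [hb]
            · rw [htr, hlast]
              dsimp only
              rcases hcase with hbcd | hr7 | hn1 | hn2 | hn3
              · cases hb : (decide (d.getD (ks[i]'hik) 0 ≥ 3) &&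
                    canFormExactMelds (d.modify (ks[i]'hik) 0 (· - 3)) (m - 1)) <;>
                  simp [hb, hbcd]
              · cases hb : (decide (d.getD (ks[i]'hik) 0 ≥ 3) &&
                    canFormExactMelds (d.modify (ks[i]'hik) 0 (· - 3)) (m - 1)) <;>
                  simp [hb, hr7]
              · rw [getD_of_not_mem_zip d ks v hlen hit _ hn1]
                cases hb : (decide (d.getD (ks[i]'hik) 0 ≥ 3) &&
                    canFormExactMelds (d.modify (ks[i]'hik) 0 (· - 3)) (m - 1)) <;>
                  simp [hb]
              · rw [getD_of_not_mem_zip d ks v hlen hit _ hn2]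
                cases hb : (decide (d.getD (ks[i]'hik) 0 ≥ 3) &&
                    canFormExactMelds (d.modify (ks[i]'hik) 0 (· - 3)) (m - 1)) <;>
                  simp [hb]
              · rw [getD_of_not_mem_zip d ks v hlen hit _ hn3]
                cases hb : (decide (d.getD (ks[i]'hik) 0 ≥ 3) &&
                    canFormExactMelds (d.modify (ks[i]'hik) 0 (· - 3)) (m - 1)) <;>
                  simp [hb]
          · obtain ⟨r, s, htr2, hlast2, hbcd, hr7, hia, hib, hic⟩ :=
              altChowTriple_some_spec ks (ks[i]'hik) a b c hct
            obtain ⟨ha, hka, -⟩ := PySem.List.getElem_of_index?_eq_some hia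
            obtain ⟨hbb, hkb, -⟩ := PySem.List.getElem_of_index?_eq_some hib
            obtain ⟨hcc, hkc, -⟩ := PySem.List.getElem_of_index?_eq_some hic
            have hgA : ks.getD a "" = PySem.Int.toStr r ++ String.ofList [s] := by
              rw [List.getD_eq_getElem ks "" ha, hka]
            have hgB : ks.getD b "" = PySem.Int.toStr (r + 1) ++ String.ofList [s] := by
              rw [List.getD_eq_getElem ks "" hbb, hkb]
            have hgC : ks.getD c "" = PySem.Int.toStr (r + 2) ++ String.ofList [s] := by
              rw [List.getD_eq_getElem ks "" hcc, hkc]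
            have e1 : d.getD (PySem.Int.toStr r ++ String.ofList [s]) 0 = v.getD a 0 := by
              rw [← hgA]
              exact getD_of_items_zip d ks v hnd hlen hit a ha
            have hm1 := items_modify_zip d ks v hnd hlen hit a ha (· - 1)
            rw [hgA] at hm1
            have hlen1 : (v.set a (v.getD a 0 - 1)).length = ks.length := by
              rw [List.length_set]; exact hlen
            have e2 : d.getD (PySem.Int.toStr (r + 1) ++ String.ofList [s]) 0 = v.getD b 0 := by
              rw [← hgB]
              exact getD_of_items_zip d ks v hnd hlen hit b hbb
            have hm2 := items_modify_zip _ ks _ hnd hlen1 hm1 b hbb (· - 1)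
            rw [hgB] at hm2
            have hlen2 : ((v.set a (v.getD a 0 - 1)).set b
                ((v.set a (v.getD a 0 - 1)).getD b 0 - 1)).length = ks.length := by
              rw [List.length_set]; exact hlen1
            have e3 : d.getD (PySem.Int.toStr (r + 2) ++ String.ofList [s]) 0 = v.getD c 0 := by
              rw [← hgC]
              exact getD_of_items_zip d ks v hnd hlen hit c hcc
            have hm3 := items_modify_zip _ ks _ hnd hlen2 hm2 c hcc (· - 1)
            rw [hgC] at hm3
            have erec : canFormExactMelds
                (((d.modify (PySem.Int.toStr r ++ String.ofList [s]) 0 (· - 1)).modify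
                  (PySem.Int.toStr (r + 1) ++ String.ofList [s]) 0 (· - 1)).modify
                  (PySem.Int.toStr (r + 2) ++ String.ofList [s]) 0 (· - 1)) (m - 1) =
                dfs1 (ks.map (altChowTriple ks))
                  (((v.set a (v.getD a 0 - 1)).set b
                    ((v.set a (v.getD a 0 - 1)).getD b 0 - 1)).set c
                    (((v.set a (v.getD a 0 - 1)).set b
                      ((v.set a (v.getD a 0 - 1)).getD b 0 - 1)).getD c 0 - 1)) (m - 1) := by
              exact ih (m - 1).toNat (by omega) (m - 1) rfl _ _
                (by rw [List.length_set]; exact hlen2) hm3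
            cases hb : (decide (d.getD (ks[i]'hik) 0 ≥ 3) &&
                canFormExactMelds (d.modify (ks[i]'hik) 0 (· - 3)) (m - 1))
            · simp only [hb, Bool.false_eq_true, if_false, Bool.false_or]
              rw [htr2, hlast2]
              dsimp only
              rw [if_pos hbcd, if_pos (by exact decide_eq_true hr7)]
              rw [e1, e2, e3, erec]
              cases hp : (decide (v.getD a 0 > 0) && decide (v.getD b 0 > 0) &&
                  decide (v.getD c 0 > 0)) <;> simp [hp]
            · simp [hb]

theorem countExposedMelds_eq (exposed : List (List String)) :
    countExposedMelds exposed =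
      if exposed.all (fun m => m.length == 3 || m.length == 4) then
        some (exposed.length : Int)
      else none := by
  induction exposed with
  | nil => simp [countExposedMelds]
  | cons m rest ih =>
    rw [countExposedMelds, ih]
    by_cases h : m.length = 3 ∨ m.length = 4
    · rw [if_pos h]
      have hb : (m.length == 3 || m.length == 4) = true := by
        rcases h with h | h <;> simp [h]
      by_cases hall : rest.all (fun m => m.length == 3 || m.length == 4)
      · simp only [List.all_cons, hb, hall, Bool.true_and, if_true, Option.map_some,
          Option.some.injEq, List.length_cons]
        omega
      · simp [List.all_cons, hb, hall]
    · rw [if_neg h]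
      have hb : (m.length == 3 || m.length == 4) = false := by
        simp only [not_or] at h
        simp [h.1, h.2]
      simp [List.all_cons, hb]

theorem enumerate_map_dec_eq_set (cnt : List Int) (j : Nat) (hj : j < cnt.length) :
    (PySem.List.enumerate cnt).map
        (fun q => if q.1 == ((j : Nat) : Int) then q.2 - 2 else q.2) =
      cnt.set j (cnt.getD j 0 - 2) := by
  apply List.ext_getElem
  · rw [List.length_map, PySem.List.length_enumerate, List.length_set]
  · intro t h1 h2
    have hts : t < cnt.length := by
      rw [List.length_map, PySem.List.length_enumerate] at h1
      exact h1
    rw [List.getElem_map, PySem.List.getElem_enumerate]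
    simp only [zero_add]
    by_cases htj : t = j
    · subst htj
      rw [if_pos (by simp), List.getElem_set_self, List.getD_eq_getElem cnt 0 hts]
    · have hne : (((t : Nat) : Int) == ((j : Nat) : Int)) = false := by
        simp only [beq_eq_false_iff_ne, ne_eq, Int.natCast_inj]
        exact htj
      rw [hne]
      simp only [Bool.false_eq_true, if_false]
      rw [List.getElem_set_ne (by omega)]

theorem any_eq_of_pointwise {α β : Type} (xs : List α) (ys : List β) (f : α → Bool)
    (g : β → Bool) (hlen : xs.length = ys.length)
    (h : ∀ (j : Nat) (h1 : j < xs.length) (h2 : j < ys.length), f (xs[j]'h1) = g (ys[j]'h2)) :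
    xs.any f = ys.any g := by
  induction xs generalizing ys with
  | nil =>
    have : ys = [] := by cases ys <;>simp_all
    subst this; rfl
  | cons x xs ih =>
    cases ys with
    | nil => simp at hlen
    | cons y ys =>
      simp only [List.any_cons]
      have h0 := h 0 (by simp) (by simp)
      simp only [List.getElem_cons_zero] at h0
      rw [h0]
      rw [ih ys (by simpa using hlen) (fun j h1 h2 => by
        have := h (j + 1) (by simpa using h1) (by simpa using h2)
        simpa using this)]

theorem main_any_eq (concealed : List String) (needed : Int) :
    (PySem.Dict.counter concealed).items.any (fun p =>
        decide (p.2 ≥ 2) &&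
          canFormExactMelds ((PySem.Dict.counter concealed).modify p.1 0 (· - 2)) needed) =
      (PySem.List.enumerate ((PySem.Set.ofList concealed).map
          (fun t => (concealed.count t : Int)))).any (fun p =>
        decide (p.2 ≥ 2) &&
          solveStack ((PySem.Set.ofList concealed).map
              (altChowTriple (PySem.Set.ofList concealed)))
            [((PySem.List.enumerate ((PySem.Set.ofList concealed).map
                (fun t => (concealed.count t : Int)))).map
                  (fun q => if q.1 == p.1 then q.2 - 2 else q.2), needed)]) := by
  have hnd : (PySem.Set.ofList concealed).Nodup := PySem.Set.nodup_ofList concealed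
  have hlenKC : ((PySem.Set.ofList concealed).map (fun t => (concealed.count t : Int))).length =
      (PySem.Set.ofList concealed).length := List.length_map ..
  have hzip : ∀ (K : List String),
      K.zip (K.map (fun t => (concealed.count t : Int))) =
      K.map (fun k => (k, (concealed.count k : Int))) := by
    intro K
    induction K with
    | nil => rfl
    | cons k K ih => simp only [List.map_cons, List.zip_cons_cons, ih]
  have hit : (PySem.Dict.counter concealed).items = (PySem.Set.ofList concealed).zip
      ((PySem.Set.ofList concealed).map (fun t => (concealed.count t : Int))) := by
    rw [hzip]
    exact PySem.Dict.items_counter concealed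
  rw [hit]
  apply any_eq_of_pointwise
  · rw [List.length_zip, PySem.List.length_enumerate, hlenKC]
    omega
  · intro j h1 h2
    have hjk : j < (PySem.Set.ofList concealed).length := by
      rw [List.length_zip] at h1; omega
    have hjc : j < ((PySem.Set.ofList concealed).map
        (fun t => (concealed.count t : Int))).length := by omega
    rw [List.getElem_zip, PySem.List.getElem_enumerate]
    dsimp only
    congr 1
    rw [solveStack_eq_any]
    simp only [List.any_cons, List.any_nil, Bool.or_false]
    have hzj : ((0 : Int) + (j : Int)) = ((j : Nat) : Int) := by omega
    rw [hzj, enumerate_map_dec_eq_set _ j hjc]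
    have hmod := items_modify_zip (PySem.Dict.counter concealed) (PySem.Set.ofList concealed)
      ((PySem.Set.ofList concealed).map (fun t => (concealed.count t : Int)))
      hnd hlenKC hit j hjk (· - 2)
    rw [List.getD_eq_getElem _ "" hjk] at hmod
    exact sim (PySem.Set.ofList concealed) hnd needed.toNat needed rfl _ _
      (by rw [List.length_set]; exact hlenKC) hmod

-- ===== VERDICT (by name: the statement is the Claim_ definition above) =====
theorem is_winning_hand_with_exposed_spec : Claim_equal_is_winning_hand_with_exposed := by
  intro concealed exposed _ _
  unfold Spec_is_winning_hand_with_exposed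
  unfold is_winning_hand_with_exposed is_winning_hand_with_exposed_alt
  rw [countExposedMelds_eq]
  by_cases hall : exposed.all (fun m => m.length == 3 || m.length == 4)
  · rw [if_pos hall]
    simp only [hall, Bool.not_true, Bool.false_eq_true, if_false]
    by_cases hneg : (4 - (exposed.length : Int)) < 0
    · simp [hneg]
    · by_cases hlen : (concealed.length : Int) ≠ (4 - (exposed.length : Int)) * 3 + 2
      · simp [hneg, hlen]
      · rw [if_neg hneg, if_neg hlen,
          if_neg (show ¬ ((decide (4 - (exposed.length : Int) < 0) ||
            decide ((concealed.length : Int) ≠ (4 - (exposed.length : Int)) * 3 + 2)) = true) by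
            simp [hneg, hlen])]
        exact main_any_eq concealed (4 - (exposed.length : Int))
  · rw [if_neg hall]
    simp [hall]
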